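-- pv_equiv track=rewrite | github.com/lumen9078/coding_test | DFSBFS/9372.py | dfs
-- ===== SOURCE A (Python) =====
-- def dfs(graph, start, visited):
--     visited[start] = True
--     cnt = 0
--
--     for i in graph[start]:
--         if not visited[i]:
--             cnt += 1
--             cnt += dfs(graph, i, visited)
--
--     return cnt
-- ===== SOURCE B (Python) =====
-- def dfs(graph, start, visited):
--     # Iterative DFS over an explicit stack of NODES: mark-and-count at push time,
--     # read a node's adjacency row only when it is popped.
--     visited[start] = True
--     cnt = 0
--     stack = [start]
--     while stack:
--         node = stack.pop()
--         for i in graph[node]: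
--             if not visited[i]:
--                 visited[i] = True
--                 cnt += 1
--                 stack.append(i)
--     return cnt
-- ===== Notes on version B (the rewrite author's own statement) =====
-- stated objective: alternative
-- what changed: A's recursive DFS (descend into each newly visited neighbor immediately) is replaced by an iterative worklist: an explicit stack of nodes, marking and counting every unvisited neighbor of the popped node at push time and reading a node's adjacency row only when it is popped, so the traversal order differs and equality of the counts is proved via an order-independence (reachability-closure) argument.
-- outside the precondition, e.g. on dfs([[0], [5]], 0, [False, False]): A returns 0, B returns 0; on dfs([[-2], [0, 2], [-1]], 1, [False, True, False, False]): A returns 2, B returns 3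
import Mathlib
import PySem

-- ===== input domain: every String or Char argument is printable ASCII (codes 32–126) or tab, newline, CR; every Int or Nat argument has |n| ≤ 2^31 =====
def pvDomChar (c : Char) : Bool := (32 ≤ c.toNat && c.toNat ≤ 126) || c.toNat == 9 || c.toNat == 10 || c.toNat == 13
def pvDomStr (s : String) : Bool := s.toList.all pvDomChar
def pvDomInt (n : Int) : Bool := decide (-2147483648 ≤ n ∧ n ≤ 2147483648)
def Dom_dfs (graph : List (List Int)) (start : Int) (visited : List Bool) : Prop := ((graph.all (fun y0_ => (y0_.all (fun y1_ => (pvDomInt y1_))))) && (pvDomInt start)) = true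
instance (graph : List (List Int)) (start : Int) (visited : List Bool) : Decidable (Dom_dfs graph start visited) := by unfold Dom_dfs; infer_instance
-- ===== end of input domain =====

-- B replaces A's recursion by an iterative DFS over an explicit stack of nodes (mark-and-count
-- at push time, a node's adjacency row is read only when it is popped), so the traversal ORDER
-- differs from A's; objective: alternative decomposition, same cost. Both A and B mutate
-- `visited` in place identically in Python (the same set of cells ends True under Pre_);
-- the equivalence proved here is about the return value.


-- ===== PORT A =====
-- A's `for i in graph[start]` loop body, including the recursive `dfs` call (the flip of
-- visited[i] to True makes the count of False entries drop, so `fuel` bounds the recursion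
-- depth; `none` = IndexError or exhausted fuel, both excluded by Pre_).
def dfsGoA (g : List (List Int)) : Nat → List Int → Int → List Bool → Option (Int × List Bool)
  | _, [], cnt, v => some (cnt, v)
  | fuel, i :: is, cnt, v =>
    match PySem.List.pyGet? v i with          -- `not visited[i]`
    | none => none
    | some b =>
      if b then dfsGoA g fuel is cnt v
      else
        match fuel with
        | 0 => none
        | f + 1 =>
          match PySem.List.pySet? v i true with     -- recursive call: visited[i] = True
          | none => none
          | some v1 =>
            match PySem.List.pyGet? g i with        -- … then graph[i]
            | none => none
            | some row =>
              match dfsGoA g f row 0 v1 with        -- cnt += 1; cnt += dfs(graph, i, visited)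
              | none => none
              | some (c2, v2) => dfsGoA g (f + 1) is (cnt + 1 + c2) v2
  termination_by fuel l _ _ => (fuel, l.length)

def dfs (graph : List (List Int)) (start : Int) (visited : List Bool) : Int :=
  match PySem.List.pySet? visited start true with   -- visited[start] = True
  | none => 0
  | some v1 =>
    match PySem.List.pyGet? graph start with        -- graph[start]
    | none => 0
    | some row => ((dfsGoA graph visited.length row 0 v1).map Prod.fst).getD 0

-- ===== PORT B =====
-- B's inner `for i in graph[node]` loop: flip each unvisited entry, count it and push it
-- (head of the list = top of the stack); each flip consumes one unit of fuel.
def pushRow : List Int → Nat → List Int → Int → List Bool → Option (Nat × List Int × Int × List Bool)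
  | [], fuel, stk, cnt, v => some (fuel, stk, cnt, v)
  | i :: is, fuel, stk, cnt, v =>
    match PySem.List.pyGet? v i with          -- `not visited[i]`
    | none => none
    | some b =>
      if b then pushRow is fuel stk cnt v
      else
        match fuel with
        | 0 => none
        | f + 1 =>
          match PySem.List.pySet? v i true with     -- visited[i] = True
          | none => none
          | some v1 => pushRow is f (i :: stk) (cnt + 1) v1   -- cnt += 1; stack.append(i)

-- fuel + stack size is preserved by pushRow (each flip trades one fuel for one stack slot);
-- cited by dfsGoB's decreasing_by
theorem pushRow_meas : ∀ {is : List Int} {fuel : Nat} {stk : List Int} {cnt : Int} {v : List Bool}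
    {f' : Nat} {stk' : List Int} {cnt' : Int} {v' : List Bool},
    pushRow is fuel stk cnt v = some (f', stk', cnt', v') → f' + stk'.length = fuel + stk.length := by
  intro is fuel stk cnt v f' stk' cnt' v' h
  fun_induction pushRow is fuel stk cnt v with
  | case1 => simp at h; obtain ⟨h1, h2, _, _⟩ := h; simp [h1, h2]
  | case2 => simp_all
  | case3 _ _ _ _ _ _ _ ih => exact ih h
  | case4 => simp_all
  | case5 => simp_all
  | case6 i is fuel stk cnt v hget hb f v1 hset ih => have := ih h; simp at this ⊢; omega

-- B's `while stack:` loop: pop a node, read its row, flip/count/push its unvisited entries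
def dfsGoB (g : List (List Int)) : Nat → List Int → Int → List Bool → Option (Int × List Bool)
  | _, [], cnt, v => some (cnt, v)
  | fuel, node :: stk, cnt, v =>
    match PySem.List.pyGet? g node with       -- node = stack.pop(); graph[node]
    | none => none
    | some row =>
      match h : pushRow row fuel stk cnt v with
      | none => none
      | some (f', stk', cnt', v') => dfsGoB g f' stk' cnt' v'
  termination_by fuel stk _ _ => fuel + stk.length
  decreasing_by have := pushRow_meas h; simp at this ⊢; omega

def dfs_alt (graph : List (List Int)) (start : Int) (visited : List Bool) : Int :=
  match PySem.List.pySet? visited start true with   -- visited[start] = True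
  | none => 0
  | some v1 => ((dfsGoB graph visited.length [start] 0 v1).map Prod.fst).getD 0   -- stack = [start]

-- ===== PRECONDITION & SPEC =====
-- `RowOk g v row`: every entry of `row` is a valid index into `visited` and, when its cell is
-- initially False (so the traversal may descend into it), also into `graph` — and then it must
-- name the same position in both arrays (equal lengths, or a non-negative index).
def RowOk (g : List (List Int)) (v : List Bool) (row : List Int) : Prop :=
  ∀ i ∈ row, PySem.Raise.InRange v.length i ∧
    (PySem.List.pyGet? v i = some false →
      PySem.Raise.InRange g.length i ∧ (g.length = v.length ∨ 0 ≤ i))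

-- rows of initially-unvisited nodes (either sign of the Python index reaching position k)
def PreRows (g : List (List Int)) (v : List Bool) : Prop :=
  ∀ (k : Nat) (hk : k < g.length),
    (PySem.List.pyGet? v (k : Int) = some false ∨
     PySem.List.pyGet? v ((k : Int) - g.length) = some false) →
    RowOk g v (g[k]'hk)

-- Pre_ admits the inputs where `start`, the entries of its row, and the rows of every
-- initially-unvisited node are in range of both arrays (A raises IndexError on most inputs
-- outside that, though on some — the bad entry sits in a row the traversal never reaches —
-- A returns and a closed-form Pre_ cannot express reachability), and where no descent index
-- can name different positions of graph and visited (equal lengths or non-negative indices):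
-- with unequal lengths a cell reachable through both a negative and a non-negative alias gets
-- its explored row picked by traversal order, so A's value there is an artefact of its DFS order.
def Pre_dfs (graph : List (List Int)) (start : Int) (visited : List Bool) : Prop :=
  (PySem.Raise.InRange visited.length start ∧ PySem.Raise.InRange graph.length start) ∧
  (∀ row, PySem.List.pyGet? graph start = some row → RowOk graph visited row) ∧
  PreRows graph visited
instance (graph : List (List Int)) (start : Int) (visited : List Bool) : Decidable (Pre_dfs graph start visited) := by unfold Pre_dfs PreRows RowOk; infer_instance

def pvWitness_dfs : List (List Int) × Int × List Bool :=
  ([[1, 2], [0, 2], [-3, 1]], 0, [false, false, false])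

def Spec_dfs (graph : List (List Int)) (start : Int) (visited : List Bool) (out : Int) : Prop := out = dfs_alt graph start visited
instance (graph : List (List Int)) (start : Int) (visited : List Bool) (out : Int) : Decidable (Spec_dfs graph start visited out) := by unfold Spec_dfs; infer_instance

-- ===== CLAIM (what is proved, stated in full; the proofs are below) =====
def Claim_equal_dfs : Prop := ∀ (graph : List (List Int)) (start : Int) (visited : List Bool), Dom_dfs graph start visited → Pre_dfs graph start visited → Spec_dfs graph start visited (dfs graph start visited)

-- ===== LEMMAS AND PROOFS =====

-- number of False cells
def cntF (v : List Bool) : Nat := v.countP (fun b => !b)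

-- `v'` refines `v`: same length, True cells persist
def Mono (v v' : List Bool) : Prop :=
  v'.length = v.length ∧ ∀ (k : Nat), v[k]? = some true → v'[k]? = some true

-- cell k was flipped between v and v'
def Flip (v v' : List Bool) (k : Nat) : Prop := v[k]? = some false ∧ v'[k]? = some true

-- node (cell) u is fully explored in v': every entry of its row reads True
def Good (g : List (List Int)) (v' : List Bool) (u : Nat) : Prop :=
  ∀ row, g[u]? = some row → ∀ j ∈ row, PySem.List.pyGet? v' j = some true

-- cells reachable from the entries of start's row `row0` through initially-False cells
inductive Reach (g : List (List Int)) (v1 : List Bool) (row0 : List Int) : Nat → Prop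
  | base (j : Int) (k : Nat) : j ∈ row0 → PySem.List.pyIdx? v1.length j = some k →
      Reach g v1 row0 k
  | step (u k : Nat) (j : Int) (row : List Int) : Reach g v1 row0 u → v1[u]? = some false →
      g[u]? = some row → j ∈ row → PySem.List.pyIdx? v1.length j = some k →
      Reach g v1 row0 k

-- the Int index j names a reachable cell (whenever it names a cell at all)
def ReachI (g : List (List Int)) (v1 : List Bool) (row0 : List Int) (j : Int) : Prop :=
  ∀ k, PySem.List.pyIdx? v1.length j = some k → Reach g v1 row0 k

lemma pySet?_length {α : Type} {xs ys : List α} {i : Int} {v : α}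
    (h : PySem.List.pySet? xs i v = some ys) : ys.length = xs.length := by
  unfold PySem.List.pySet? at h
  cases hk : PySem.List.pyIdx? xs.length i with
  | none => simp [hk] at h
  | some k => simp [hk] at h; simp [← h]

lemma pyIdx?_spec {n : Nat} {i : Int} {k : Nat}
    (h : PySem.List.pyIdx? n i = some k) :
    k < n ∧ (0 ≤ i → (k : Int) = i) ∧ (i < 0 → (k : Int) - n = i) := by
  unfold PySem.List.pyIdx? at h
  split_ifs at h with h1 h2 h3 <;> simp at h <;> omega

lemma pyGet?_canon {α : Type} {xs : List α} {j : Int} {k : Nat}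
    (h : PySem.List.pyIdx? xs.length j = some k) : PySem.List.pyGet? xs j = xs[k]? := by
  unfold PySem.List.pyGet?
  rw [h]
  rfl

lemma mono_refl (v : List Bool) : Mono v v := ⟨rfl, fun _ h => h⟩

lemma mono_trans {u v w : List Bool} (h1 : Mono u v) (h2 : Mono v w) : Mono u w :=
  ⟨h2.1.trans h1.1, fun k hk => h2.2 k (h1.2 k hk)⟩

lemma mono_set {v v1 : List Bool} {i : Int}
    (hs : PySem.List.pySet? v i true = some v1) : Mono v v1 := by
  unfold PySem.List.pySet? at hs
  cases hk : PySem.List.pyIdx? v.length i with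
  | none => simp [hk] at hs
  | some k =>
    simp [hk] at hs
    subst hs
    refine ⟨by simp, ?_⟩
    intro m hm
    have hmlt : m < v.length := (List.getElem?_eq_some_iff.mp hm).1
    by_cases hmk : k = m
    · subst hmk
      simp [List.getElem?_set_self (by omega : k < v.length)]
    · rw [List.getElem?_set_ne hmk]
      exact hm

lemma pyGet?_true_mono {v v' : List Bool} {j : Int}
    (hm : Mono v v') (h : PySem.List.pyGet? v j = some true) :
    PySem.List.pyGet? v' j = some true := by
  unfold PySem.List.pyGet? at h ⊢
  rw [hm.1]
  cases hk : PySem.List.pyIdx? v.length j with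
  | none => simp [hk] at h
  | some k => simp [hk] at h ⊢; exact hm.2 k h

lemma pyGet?_false_down {v v' : List Bool} {j : Int}
    (hm : Mono v v') (h : PySem.List.pyGet? v' j = some false) :
    PySem.List.pyGet? v j = some false := by
  unfold PySem.List.pyGet? at h ⊢
  rw [hm.1] at h
  cases hk : PySem.List.pyIdx? v.length j with
  | none => simp [hk] at h
  | some k =>
    simp [hk] at h ⊢
    have hklt : k < v'.length := (List.getElem?_eq_some_iff.mp h).1
    have hklt' : k < v.length := by rw [← hm.1]; exact hklt
    cases hb : v[k]? with
    | none => simp [List.getElem?_eq_none_iff] at hb; omega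
    | some b =>
      cases b with
      | false => rfl
      | true => have := hm.2 k hb; rw [this] at h; simp at h

lemma cntF_set {v v1 : List Bool} {i : Int}
    (hg : PySem.List.pyGet? v i = some false)
    (hs : PySem.List.pySet? v i true = some v1) : cntF v1 + 1 = cntF v := by
  unfold PySem.List.pySet? at hs
  unfold PySem.List.pyGet? at hg
  unfold cntF
  cases hk : PySem.List.pyIdx? v.length i with
  | none => simp [hk] at hs
  | some k =>
    simp [hk] at hs hg
    have hklt : k < v.length := (List.getElem?_eq_some_iff.mp hg).1
    have hvk : v[k] = false := (List.getElem?_eq_some_iff.mp hg).2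
    subst hs
    rw [List.countP_set]
    · have hpos : 0 < List.countP (fun b => !b) v := by
        rw [List.countP_pos_iff]
        exact ⟨v[k], List.getElem_mem hklt, by simp [hvk]⟩
      simp [hvk]
      omega
    · exact hklt

lemma get_after_set {v v1 : List Bool} {i : Int}
    (hs : PySem.List.pySet? v i true = some v1) : PySem.List.pyGet? v1 i = some true := by
  have hlen := pySet?_length hs
  unfold PySem.List.pySet? at hs
  unfold PySem.List.pyGet?
  rw [hlen]
  cases hk : PySem.List.pyIdx? v.length i with
  | none => simp [hk] at hs
  | some k =>
    simp [hk] at hs ⊢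
    subst hs
    have hklt : k < v.length := (pyIdx?_spec hk).1
    simp [List.getElem?_set_self hklt]

lemma flip_only_set {v v1 : List Bool} {i : Int} {k : Nat}
    (hs : PySem.List.pySet? v i true = some v1)
    (hf : Flip v v1 k) : PySem.List.pyIdx? v.length i = some k := by
  unfold PySem.List.pySet? at hs
  cases hk : PySem.List.pyIdx? v.length i with
  | none => simp [hk] at hs
  | some m =>
    simp [hk] at hs
    subst hs
    obtain ⟨hf1, hf2⟩ := hf
    by_cases hmk : m = k
    · subst hmk; rfl
    · rw [List.getElem?_set_ne hmk, hf1] at hf2; simp at hf2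

lemma flip_split {v vm v' : List Bool} {k : Nat}
    (hm1 : Mono v vm) (hf : Flip v v' k) : Flip v vm k ∨ Flip vm v' k := by
  obtain ⟨hf1, hf2⟩ := hf
  have hklt : k < v.length := (List.getElem?_eq_some_iff.mp hf1).1
  have hklt' : k < vm.length := by rw [hm1.1]; exact hklt
  cases hb : vm[k]? with
  | none => simp [List.getElem?_eq_none_iff] at hb; omega
  | some b =>
    cases b with
    | true => exact Or.inl ⟨hf1, hb⟩
    | false => exact Or.inr ⟨hb, hf2⟩

-- the row of a node whose cell is (still) False in v is covered by PreRows
lemma rowOk_of_flip {g : List (List Int)} {v0 v : List Bool} {i : Int} {row : List Int}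
    (HgOk : PreRows g v0) (hmon : Mono v0 v)
    (hcell : PySem.List.pyGet? v i = some false)
    (hrow : PySem.List.pyGet? g i = some row) : RowOk g v0 row := by
  have hcell0 := pyGet?_false_down hmon hcell
  unfold PySem.List.pyGet? at hrow
  cases hk : PySem.List.pyIdx? g.length i with
  | none => simp [hk] at hrow
  | some k =>
    simp [hk] at hrow
    obtain ⟨hklt, hpos, hneg⟩ := pyIdx?_spec hk
    have h1 : g[k] = row := (List.getElem?_eq_some_iff.mp hrow).2
    refine h1 ▸ HgOk k hklt ?_
    by_cases hi : 0 ≤ i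
    · exact Or.inl ((hpos hi) ▸ hcell0)
    · exact Or.inr ((hneg (by omega)) ▸ hcell0)

-- alignment: a descent index admitted by RowOk reads the graph row of exactly its visited-cell
lemma row_at_cell {g : List (List Int)} {v : List Bool} {i : Int} {k : Nat} {row : List Int}
    (halign : g.length = v.length ∨ 0 ≤ i)
    (hk : PySem.List.pyIdx? v.length i = some k)
    (hrow : PySem.List.pyGet? g i = some row) : g[k]? = some row := by
  unfold PySem.List.pyGet? at hrow
  cases hm : PySem.List.pyIdx? g.length i with
  | none => simp [hm] at hrow
  | some m =>
    simp [hm] at hrow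
    have hspec1 := pyIdx?_spec hm
    have hspec2 := pyIdx?_spec hk
    have hmk : m = k := by
      rcases halign with hlen | hpos
      · rw [hlen] at hm; rw [hm] at hk; simpa using hk
      · have := hspec1.2.1 hpos; have := hspec2.2.1 hpos; omega
    subst hmk
    exact hrow

lemma pyGet?_isSome_of_inRange {α : Type} {xs : List α} {i : Int}
    (h : PySem.Raise.InRange xs.length i) : ∃ x, PySem.List.pyGet? xs i = some x := by
  cases hg : PySem.List.pyGet? xs i with
  | none => rw [PySem.List.pyGet?_eq_none_iff] at hg; exact absurd h hg
  | some x => exact ⟨x, rfl⟩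

lemma pySet?_isSome_of_inRange {α : Type} {xs : List α} {i : Int} (v : α)
    (h : PySem.Raise.InRange xs.length i) : ∃ ys, PySem.List.pySet? xs i v = some ys := by
  cases hs : PySem.List.pySet? xs i v with
  | none => rw [PySem.List.pySet?_eq_none_iff] at hs; exact absurd h hs
  | some ys => exact ⟨ys, rfl⟩

lemma cntF_pos {v : List Bool} {i : Int}
    (hg : PySem.List.pyGet? v i = some false) : 0 < cntF v := by
  unfold PySem.List.pyGet? at hg
  cases hk : PySem.List.pyIdx? v.length i with
  | none => simp [hk] at hg
  | some k =>
    simp [hk] at hg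
    have hklt : k < v.length := (List.getElem?_eq_some_iff.mp hg).1
    have hvk : v[k] = false := (List.getElem?_eq_some_iff.mp hg).2
    unfold cntF
    rw [List.countP_pos_iff]
    exact ⟨v[k], List.getElem_mem hklt, by simp [hvk]⟩

-- flips never un-set: a flip between endpoints happened in one of the two stages
lemma flip_irrefl {v : List Bool} {k : Nat} (h : Flip v v k) : False := by
  obtain ⟨a, b⟩ := h; rw [a] at b; simp at b

lemma good_mono {g : List (List Int)} {v v' : List Bool} {k : Nat}
    (hm : Mono v v') (h : Good g v k) : Good g v' k :=
  fun row hrow j hj => pyGet?_true_mono hm (h row hrow j hj)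

lemma canon_of_get {α : Type} {xs : List α} {i : Int} {x : α}
    (h : PySem.List.pyGet? xs i = some x) :
    ∃ k, PySem.List.pyIdx? xs.length i = some k ∧ xs[k]? = some x := by
  unfold PySem.List.pyGet? at h
  cases hk : PySem.List.pyIdx? xs.length i with
  | none => simp [hk] at h
  | some k => simp [hk] at h; exact ⟨k, rfl, h⟩

lemma cntF_mono {v v' : List Bool} (hm : Mono v v') : cntF v' ≤ cntF v := by
  induction v generalizing v' with
  | nil =>
    have hnil : v' = [] := List.eq_nil_of_length_eq_zero (by simpa using hm.1)
    subst hnil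
    exact le_refl _
  | cons a v ih =>
    cases v' with
    | nil => exact absurd hm.1 (by simp)
    | cons b w =>
      have h0 : a = true → b = true := by
        intro ha; have := hm.2 0 (by simp [ha]); simpa using this
      have htail : Mono v w :=
        ⟨by simpa using hm.1, fun k hk => by simpa using hm.2 (k + 1) (by simpa using hk)⟩
      have hiw := ih htail
      unfold cntF at hiw ⊢
      rw [List.countP_cons, List.countP_cons]
      cases a <;> cases b <;> simp_all <;> omega

-- state-refinement, exact flip count and pending-entries-True for A's recursion
lemma goA_post {g : List (List Int)} :
    ∀ {fuel : Nat} {l : List Int} {cnt c : Int} {v v' : List Bool},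
    dfsGoA g fuel l cnt v = some (c, v') →
    Mono v v' ∧ (c + (cntF v' : Int) = cnt + (cntF v : Int)) ∧
    (∀ j ∈ l, PySem.List.pyGet? v' j = some true) := by
  intro fuel l cnt c v v' h
  fun_induction dfsGoA g fuel l cnt v generalizing c v' with
  | case1 =>
    simp at h
    refine ⟨h.2 ▸ mono_refl _, by simp [h.1, h.2], by simp⟩
  | case2 => simp at h
  | case3 fuel i is cnt v hget ih =>
    obtain ⟨hm, hc, hp⟩ := ih h
    exact ⟨hm, hc, by
      intro j hj
      rcases List.mem_cons.mp hj with hj | hj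
      · exact pyGet?_true_mono hm (hj ▸ hget)
      · exact hp j hj⟩
  | case4 => simp at h
  | case5 => simp at h
  | case6 => simp at h
  | case7 => simp at h
  | case8 i is cnt v b hget hb f w1 hset row hrow c2 v2 hrec ih2 ih1 =>
    have hb' : b = false := by cases b <;> simp_all
    subst hb'
    obtain ⟨hm2, hc2, hp2⟩ := ih2 hrec
    obtain ⟨hm1, hc1, hp1⟩ := ih1 h
    have hms : Mono v w1 := mono_set hset
    have hcs := cntF_set hget hset
    have hmono : Mono v v' := mono_trans (mono_trans hms hm2) hm1
    refine ⟨hmono, by omega, ?_⟩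
    intro j hj
    rcases List.mem_cons.mp hj with hj | hj
    · subst hj
      exact pyGet?_true_mono (mono_trans hm2 hm1) (get_after_set hset)
    · exact hp1 j hj

-- every flip of A's recursion is Reachable and fully explored at the end
lemma goA_reach {g : List (List Int)} {v0 v1 : List Bool} {row0 : List Int}
    (HgOk : PreRows g v0) :
    ∀ {fuel : Nat} {l : List Int} {cnt c : Int} {v v' : List Bool},
    Mono v0 v → Mono v1 v → RowOk g v0 l → (∀ j ∈ l, ReachI g v1 row0 j) →
    dfsGoA g fuel l cnt v = some (c, v') →
    (∀ k, Flip v v' k → Reach g v1 row0 k ∧ Good g v' k) := by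
  intro fuel l cnt c v v' hm0 hm1 hl hsrc h
  fun_induction dfsGoA g fuel l cnt v generalizing c v' with
  | case1 =>
    simp at h
    intro k hk
    exact absurd (h.2 ▸ hk) flip_irrefl
  | case2 => simp at h
  | case3 fuel i is cnt v hget ih =>
    exact ih hm0 hm1 (fun j hj => hl j (by simp [hj]))
      (fun j hj => hsrc j (by simp [hj])) h
  | case4 => simp at h
  | case5 => simp at h
  | case6 => simp at h
  | case7 => simp at h
  | case8 i is cnt v b hget hb f w1 hset row hrow c2 v2 hrec ih2 ih1 =>
    have hb' : b = false := by cases b <;> simp_all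
    subst hb'
    -- basic state facts
    have hms : Mono v w1 := mono_set hset
    obtain ⟨hm2, _, hp2⟩ := goA_post hrec
    obtain ⟨hm1', _, hp1⟩ := goA_post h
    -- the canonical cell u of the flipped index i
    obtain ⟨u, hki, hvu⟩ := canon_of_get hget
    have hlen1 : v.length = v1.length := hm1.1
    have hki1 : PySem.List.pyIdx? v1.length i = some u := by rw [← hlen1]; exact hki
    have hreachU : Reach g v1 row0 u := hsrc i (by simp) u hki1
    have hv1i : PySem.List.pyGet? v1 i = some false := pyGet?_false_down hm1 hget
    have hv1u : v1[u]? = some false := by rw [← pyGet?_canon hki1]; exact hv1i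
    have hv0i : PySem.List.pyGet? v0 i = some false := pyGet?_false_down hm0 hget
    have halign : g.length = v.length ∨ 0 ≤ i := by
      have := ((hl i (by simp)).2 hv0i).2
      rcases this with hh | hh
      · exact Or.inl (by rw [hh, hm0.1])
      · exact Or.inr hh
    have hgu : g[u]? = some row := row_at_cell halign hki hrow
    -- hypotheses for the recursive call on row
    have hm0w : Mono v0 w1 := mono_trans hm0 hms
    have hm1w : Mono v1 w1 := mono_trans hm1 hms
    have hrowok : RowOk g v0 row := rowOk_of_flip HgOk hm0 hget hrow
    have hsrcrow : ∀ j ∈ row, ReachI g v1 row0 j := by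
      intro j hj k hk
      exact Reach.step u k j row hreachU hv1u hgu hj hk
    have hA2 := ih2 hm0w hm1w hrowok hsrcrow hrec
    -- hypotheses for the tail call on is
    have hm0v2 : Mono v0 v2 := mono_trans hm0w hm2
    have hm1v2 : Mono v1 v2 := mono_trans hm1w hm2
    have hA1 := ih1 hm0v2 hm1v2 (fun j hj => hl j (by simp [hj]))
      (fun j hj => hsrc j (by simp [hj])) h
    -- combine
    intro k hk
    rcases flip_split hms hk with hfk | hfk
    · -- the flip at i itself
      have hku : k = u := by
        have := flip_only_set hset hfk
        rw [hki] at this; simpa using this.symm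
      subst hku
      refine ⟨hreachU, ?_⟩
      intro row' hrow' j hj
      rw [hgu] at hrow'
      have hrr : row' = row := by simpa using hrow'.symm
      subst hrr
      exact pyGet?_true_mono hm1' (hp2 j hj)
    · rcases flip_split hm2 hfk with hfk2 | hfk2
      · obtain ⟨hr, hgd⟩ := hA2 k hfk2
        exact ⟨hr, good_mono hm1' hgd⟩
      · exact hA1 k hfk2
-- totality of A's recursion under Pre_
lemma goA_total {g : List (List Int)} {v0 : List Bool} (HgOk : PreRows g v0) :
    ∀ {fuel : Nat} {l : List Int} {cnt : Int} {v : List Bool},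
    cntF v ≤ fuel → Mono v0 v → RowOk g v0 l →
    ∃ r, dfsGoA g fuel l cnt v = some r := by
  intro fuel l cnt v
  fun_induction dfsGoA g fuel l cnt v with
  | case1 => intro _ _ _; exact ⟨_, rfl⟩
  | case2 fuel i is cnt v hget =>
    intro hfuel hmon hl
    obtain ⟨x, hx⟩ := pyGet?_isSome_of_inRange (xs := v) (i := i)
      (by rw [hmon.1]; exact (hl i (by simp)).1)
    simp [hx] at hget
  | case3 fuel i is cnt v hget ih =>
    intro hfuel hmon hl
    exact ih hfuel hmon (fun j hj => hl j (by simp [hj]))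
  | case4 i is cnt v b hget hb =>
    intro hfuel hmon hl
    have hb' : b = false := by cases b <;> simp_all
    subst hb'
    have := cntF_pos hget
    omega
  | case5 i is cnt v b hget hb f hset =>
    intro hfuel hmon hl
    obtain ⟨ys, hy⟩ := pySet?_isSome_of_inRange (xs := v) (i := i) true
      (by rw [hmon.1]; exact (hl i (by simp)).1)
    simp [hy] at hset
  | case6 i is cnt v b hget hb f w1 hset hrowget =>
    intro hfuel hmon hl
    have hb' : b = false := by cases b <;> simp_all
    subst hb'
    obtain ⟨row, hr⟩ := pyGet?_isSome_of_inRange (xs := g) (i := i)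
      ((hl i (by simp)).2 (pyGet?_false_down hmon hget)).1
    simp [hr] at hrowget
  | case7 i is cnt v b hget hb f w1 hset row hrow hrec ih =>
    intro hfuel hmon hl
    have hb' : b = false := by cases b <;> simp_all
    subst hb'
    have hc1 := cntF_set hget hset
    obtain ⟨r, hr⟩ := ih (by omega) (mono_trans hmon (mono_set hset))
      (rowOk_of_flip HgOk hmon hget hrow)
    simp [hr] at hrec
  | case8 i is cnt v b hget hb f w1 hset row hrow c2 v2 hrec ih2 ih1 =>
    intro hfuel hmon hl
    have hb' : b = false := by cases b <;> simp_all
    subst hb'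
    have hc1 := cntF_set hget hset
    obtain ⟨hm2, hcnt2, _⟩ := goA_post hrec
    have hcnt2' : cntF v2 ≤ cntF w1 := cntF_mono hm2
    exact ih1 (by omega) (mono_trans (mono_trans hmon (mono_set hset)) hm2)
      (fun j hj => hl j (by simp [hj]))

-- the full invariant of B's inner loop (needs no preconditions: success is given)
lemma pushRow_spec :
    ∀ {is : List Int} {fuel : Nat} {stk : List Int} {cnt : Int} {v : List Bool}
      {f' : Nat} {stk' : List Int} {cnt' : Int} {v' : List Bool},
    pushRow is fuel stk cnt v = some (f', stk', cnt', v') →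
    Mono v v' ∧ (cnt' + (cntF v' : Int) = cnt + (cntF v : Int)) ∧ (f' + cntF v = fuel + cntF v') ∧
    (∀ j ∈ is, PySem.List.pyGet? v' j = some true) ∧
    (∀ node ∈ stk, node ∈ stk') ∧
    (∀ node ∈ stk', node ∈ stk ∨ (PySem.List.pyGet? v node = some false ∧ node ∈ is)) ∧
    (∀ k, Flip v v' k → ∃ i, i ∈ stk' ∧ i ∈ is ∧ PySem.List.pyGet? v i = some false ∧
        PySem.List.pyIdx? v.length i = some k) := by
  intro is fuel stk cnt v f' stk' cnt' v' h
  fun_induction pushRow is fuel stk cnt v generalizing f' stk' cnt' v' with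
  | case1 fuel stk cnt v =>
    simp at h
    obtain ⟨h1, h2, h3, h4⟩ := h
    subst h1; subst h2; subst h3; subst h4
    refine ⟨mono_refl _, by ring, by ring, by simp, fun n hn => hn, fun n hn => Or.inl hn, ?_⟩
    intro k hk
    exact absurd hk flip_irrefl
  | case2 => simp at h
  | case3 i is fuel stk cnt v hget ih =>
    obtain ⟨hm, hc, hf, hp, hsub, hmem, hfl⟩ := ih h
    refine ⟨hm, hc, hf, ?_, hsub, ?_, ?_⟩
    · intro j hj
      rcases List.mem_cons.mp hj with hj | hj
      · exact pyGet?_true_mono hm (hj ▸ hget)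
      · exact hp j hj
    · intro n hn
      rcases hmem n hn with hh | ⟨hh1, hh2⟩
      · exact Or.inl hh
      · exact Or.inr ⟨hh1, by simp [hh2]⟩
    · intro k hk
      obtain ⟨i', h1, h2, h3, h4⟩ := hfl k hk
      exact ⟨i', h1, by simp [h2], h3, h4⟩
  | case4 => simp at h
  | case5 => simp at h
  | case6 i is stk cnt v b hget hb f w1 hset ih =>
    have hb' : b = false := by cases b <;> simp_all
    subst hb'
    obtain ⟨hm, hc, hf, hp, hsub, hmem, hfl⟩ := ih h
    have hms : Mono v w1 := mono_set hset
    have hcs := cntF_set hget hset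
    have hlenw : w1.length = v.length := pySet?_length hset
    obtain ⟨u, hki, hvu⟩ := canon_of_get hget
    refine ⟨mono_trans hms hm, by omega, by omega, ?_, ?_, ?_, ?_⟩
    · intro j hj
      rcases List.mem_cons.mp hj with hj | hj
      · exact pyGet?_true_mono hm (hj ▸ get_after_set hset)
      · exact hp j hj
    · intro n hn
      exact hsub n (by simp [hn])
    · intro n hn
      rcases hmem n hn with hh | ⟨hh1, hh2⟩
      · rcases List.mem_cons.mp hh with hh' | hh'
        · exact Or.inr ⟨hh' ▸ hget, by simp [hh']⟩
        · exact Or.inl hh'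
      · exact Or.inr ⟨pyGet?_false_down hms hh1, by simp [hh2]⟩
    · intro k hk
      rcases flip_split hms hk with hfk | hfk
      · have hku := flip_only_set hset hfk
        refine ⟨i, hsub i (by simp), by simp, hget, hku⟩
      · obtain ⟨i', h1, h2, h3, h4⟩ := hfl k hfk
        exact ⟨i', h1, by simp [h2], pyGet?_false_down hms h3, by rw [← hlenw]; exact h4⟩

-- what a stack node guarantees: its row exists, is admissible and Reach-sourced
def StkOk (g : List (List Int)) (v0 v1 : List Bool) (row0 : List Int) (node : Int) : Prop :=
  ∃ row, PySem.List.pyGet? g node = some row ∧ RowOk g v0 row ∧ ∀ j ∈ row, ReachI g v1 row0 j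

-- state-refinement and exact flip count for B's outer loop
lemma goB_post {g : List (List Int)} :
    ∀ {fuel : Nat} {stk : List Int} {cnt c : Int} {v v' : List Bool},
    dfsGoB g fuel stk cnt v = some (c, v') →
    Mono v v' ∧ (c + (cntF v' : Int) = cnt + (cntF v : Int)) := by
  intro fuel stk cnt c v v' h
  fun_induction dfsGoB g fuel stk cnt v generalizing c v' with
  | case1 =>
    simp at h
    exact ⟨h.2 ▸ mono_refl _, by simp [h.1, h.2]⟩
  | case2 => simp at h
  | case3 => simp at h
  | case4 fuel node stk cnt v row hrowget f' stk' cnt' vmid hpush ih =>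
    obtain ⟨hm, hc, _, _, _, _, _⟩ := pushRow_spec hpush
    obtain ⟨hm2, hc2⟩ := ih h
    exact ⟨mono_trans hm hm2, by omega⟩

-- at the end of B's loop every stack node's row reads all-True, and every flip is
-- Reachable and fully explored
lemma goB_reach {g : List (List Int)} {v0 v1 : List Bool} {row0 : List Int}
    (HgOk : PreRows g v0) :
    ∀ {fuel : Nat} {stk : List Int} {cnt c : Int} {v v' : List Bool},
    Mono v0 v → Mono v1 v → (∀ node ∈ stk, StkOk g v0 v1 row0 node) →
    dfsGoB g fuel stk cnt v = some (c, v') →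
    (∀ node ∈ stk, ∀ row, PySem.List.pyGet? g node = some row →
      ∀ j ∈ row, PySem.List.pyGet? v' j = some true) ∧
    (∀ k, Flip v v' k → Reach g v1 row0 k ∧ Good g v' k) := by
  intro fuel stk cnt c v v' hm0 hm1 hstk h
  fun_induction dfsGoB g fuel stk cnt v generalizing c v' with
  | case1 =>
    simp at h
    refine ⟨by simp, ?_⟩
    intro k hk
    exact absurd (h.2 ▸ hk) flip_irrefl
  | case2 => simp at h
  | case3 => simp at h
  | case4 fuel node stk cnt v row hrowget f' stk' cnt' vmid hpush ih =>
    obtain ⟨rowN, hrowN, hrowokN, hsrcN⟩ := hstk node (by simp)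
    have hroweq : rowN = row := by rw [hrowN] at hrowget; simpa using hrowget
    rw [hroweq] at hrowN hrowokN hsrcN
    obtain ⟨hm, _, _, hp, hsub, hmem, hfl⟩ := pushRow_spec hpush
    have hm0m : Mono v0 vmid := mono_trans hm0 hm
    have hm1m : Mono v1 vmid := mono_trans hm1 hm
    -- the new stack satisfies the invariant
    have hstk' : ∀ nd ∈ stk', StkOk g v0 v1 row0 nd := by
      intro nd hnd
      rcases hmem nd hnd with hh | ⟨hfalse, hmemrow⟩
      · exact hstk nd (by simp [hh])
      · -- a freshly flipped node: its row exists, is admissible and Reach-sourced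
        have hv0nd : PySem.List.pyGet? v0 nd = some false := pyGet?_false_down hm0 hfalse
        obtain ⟨u, hku, _⟩ := canon_of_get hfalse
        have hku1 : PySem.List.pyIdx? v1.length nd = some u := by rw [← hm1.1]; exact hku
        have hreachU : Reach g v1 row0 u := hsrcN nd hmemrow u hku1
        have hv1u : v1[u]? = some false := by
          rw [← pyGet?_canon hku1]; exact pyGet?_false_down hm1 hfalse
        have hrdat := (hrowokN nd hmemrow).2 hv0nd
        obtain ⟨row2, hrow2⟩ := pyGet?_isSome_of_inRange (xs := g) (i := nd) hrdat.1
        have halign : g.length = v.length ∨ 0 ≤ nd := by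
          rcases hrdat.2 with hh | hh
          · exact Or.inl (by rw [hh, hm0.1])
          · exact Or.inr hh
        have hgu : g[u]? = some row2 := row_at_cell halign hku hrow2
        refine ⟨row2, hrow2, rowOk_of_flip HgOk hm0 hfalse hrow2, ?_⟩
        intro j hj k hk
        exact Reach.step u k j row2 hreachU hv1u hgu hj hk
    obtain ⟨hrows, hflips⟩ := ih hm0m hm1m hstk' h
    obtain ⟨hmR, _⟩ := goB_post h
    constructor
    · intro nd hnd rowX hrowX
      rcases List.mem_cons.mp hnd with hh | hh
      · subst hh
        have : rowX = row := by rw [hrowX] at hrowget; simpa using hrowget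
        subst this
        intro j hj
        exact pyGet?_true_mono hmR (hp j hj)
      · exact hrows nd (hsub nd hh) rowX hrowX
    · intro k hk
      rcases flip_split hm hk with hfk | hfk
      · obtain ⟨i', hi1, hi2, hi3, hi4⟩ := hfl k hfk
        -- Reach: i' is an entry of node's row
        have hki1 : PySem.List.pyIdx? v1.length i' = some k := by rw [← hm1.1]; exact hi4
        have hreach : Reach g v1 row0 k := hsrcN i' hi2 k hki1
        refine ⟨hreach, ?_⟩
        -- Good: i''s row is on the final stack-rows-true conclusion
        have hv0i : PySem.List.pyGet? v0 i' = some false := pyGet?_false_down hm0 hi3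
        have hrdat := (hrowokN i' hi2).2 hv0i
        obtain ⟨row2, hrow2⟩ := pyGet?_isSome_of_inRange (xs := g) (i := i') hrdat.1
        have halign : g.length = v.length ∨ 0 ≤ i' := by
          rcases hrdat.2 with hh | hh
          · exact Or.inl (by rw [hh, hm0.1])
          · exact Or.inr hh
        have hgu : g[k]? = some row2 := row_at_cell halign hi4 hrow2
        intro rowY hrowY j hj
        have hYr : rowY = row2 := by rw [hgu] at hrowY; simpa using hrowY.symm
        rw [hYr] at hj
        exact hrows i' hi1 row2 hrow2 j hj
      · exact hflips k hfk

-- totality of B's loops under Pre_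
lemma pushRow_total :
    ∀ {is : List Int} {fuel : Nat} {stk : List Int} {cnt : Int} {v : List Bool},
    cntF v ≤ fuel → (∀ i ∈ is, PySem.Raise.InRange v.length i) →
    ∃ r, pushRow is fuel stk cnt v = some r := by
  intro is fuel stk cnt v
  fun_induction pushRow is fuel stk cnt v with
  | case1 => intro _ _; exact ⟨_, rfl⟩
  | case2 i is fuel stk cnt v hget =>
    intro hfuel hl
    obtain ⟨x, hx⟩ := pyGet?_isSome_of_inRange (xs := v) (i := i) (hl i (by simp))
    simp [hx] at hget
  | case3 i is fuel stk cnt v hget ih =>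
    intro hfuel hl
    exact ih hfuel (fun j hj => hl j (by simp [hj]))
  | case4 i is stk cnt v b hget hb =>
    intro hfuel hl
    have hb' : b = false := by cases b <;> simp_all
    subst hb'
    have := cntF_pos hget
    omega
  | case5 i is stk cnt v b hget hb f hset =>
    intro hfuel hl
    obtain ⟨ys, hy⟩ := pySet?_isSome_of_inRange (xs := v) (i := i) true (hl i (by simp))
    simp [hy] at hset
  | case6 i is stk cnt v b hget hb f w1 hset ih =>
    intro hfuel hl
    have hb' : b = false := by cases b <;> simp_all
    subst hb'
    have hcs := cntF_set hget hset
    have hlenw : w1.length = v.length := pySet?_length hset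
    refine ih (by omega) ?_
    intro j hj
    have := hl j (by simp [hj])
    unfold PySem.Raise.InRange at this ⊢
    omega

lemma goB_total {g : List (List Int)} {v0 : List Bool} (HgOk : PreRows g v0) :
    ∀ {fuel : Nat} {stk : List Int} {cnt : Int} {v : List Bool},
    cntF v ≤ fuel → Mono v0 v →
    (∀ node ∈ stk, ∃ row, PySem.List.pyGet? g node = some row ∧ RowOk g v0 row) →
    ∃ r, dfsGoB g fuel stk cnt v = some r := by
  intro fuel stk cnt v
  fun_induction dfsGoB g fuel stk cnt v with
  | case1 => intro _ _ _; exact ⟨_, rfl⟩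
  | case2 fuel node stk cnt v hget =>
    intro hfuel hmon hstk
    obtain ⟨row, hrow, _⟩ := hstk node (by simp)
    simp [hrow] at hget
  | case3 fuel node stk cnt v row hrowget hpush =>
    intro hfuel hmon hstk
    obtain ⟨rowN, hrowN, hrowokN⟩ := hstk node (by simp)
    have hroweq : rowN = row := by rw [hrowN] at hrowget; simpa using hrowget
    subst hroweq
    obtain ⟨r, hr⟩ := pushRow_total (stk := stk) (cnt := cnt) hfuel
      (fun j hj => by rw [hmon.1]; exact (hrowokN j hj).1)
    simp [hr] at hpush
  | case4 fuel node stk cnt v row hrowget f' stk' cnt' vmid hpush ih =>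
    intro hfuel hmon hstk
    obtain ⟨rowN, hrowN, hrowokN⟩ := hstk node (by simp)
    have hroweq : rowN = row := by rw [hrowN] at hrowget; simpa using hrowget
    subst hroweq
    obtain ⟨hm, _, hfl, _, hsub, hmem, _⟩ := pushRow_spec hpush
    refine ih (by omega) (mono_trans hmon hm) ?_
    intro nd hnd
    rcases hmem nd hnd with hh | ⟨hfalse, hmemrow⟩
    · exact hstk nd (by simp [hh])
    · have hv0nd : PySem.List.pyGet? v0 nd = some false := pyGet?_false_down hmon hfalse
      have hrdat := (hrowokN nd hmemrow).2 hv0nd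
      obtain ⟨row2, hrow2⟩ := pyGet?_isSome_of_inRange (xs := g) (i := nd) hrdat.1
      exact ⟨row2, hrow2, rowOk_of_flip HgOk hmon hfalse hrow2⟩

-- completeness: every Reachable cell ends True in any saturated final state
lemma reach_true {g : List (List Int)} {v1 v' : List Bool} {row0 : List Int}
    (hlen : v'.length = v1.length)
    (h1 : ∀ j ∈ row0, PySem.List.pyGet? v' j = some true)
    (h2 : ∀ k, Flip v1 v' k → Good g v' k) :
    ∀ k, Reach g v1 row0 k → v'[k]? = some true := by
  intro k hk
  induction hk with
  | base j k hj hkj =>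
    have hcanon : PySem.List.pyGet? v' j = v'[k]? := pyGet?_canon (by rw [hlen]; exact hkj)
    rw [← hcanon]
    exact h1 j hj
  | step u k j row hr hv1u hgu hjrow hkj ih =>
    have hfl : Flip v1 v' u := ⟨hv1u, ih⟩
    have := h2 u hfl row hgu j hjrow
    have hcanon : PySem.List.pyGet? v' j = v'[k]? := pyGet?_canon (by rw [hlen]; exact hkj)
    rw [← hcanon]
    exact this

-- ===== VERDICT (by name: the statement is the Claim_ definition above) =====
theorem dfs_spec : Claim_equal_dfs := by
  intro graph start visited _ hpre
  obtain ⟨⟨hsv, hsg⟩, hstartrow, HgOk⟩ := hpre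
  obtain ⟨v1, hset⟩ := pySet?_isSome_of_inRange (xs := visited) (i := start) true hsv
  obtain ⟨row0, hrow0⟩ := pyGet?_isSome_of_inRange (xs := graph) (i := start) hsg
  have hm01 : Mono visited v1 := mono_set hset
  have hlen1 : v1.length = visited.length := pySet?_length hset
  have hrowok0 : RowOk graph visited row0 := hstartrow row0 hrow0
  have hfuel : cntF v1 ≤ visited.length := by
    have := List.countP_le_length (p := fun b => !b) (l := v1)
    unfold cntF; omega
  -- run A
  obtain ⟨⟨cA, vA⟩, hA⟩ := goA_total HgOk (fuel := visited.length) (l := row0) (cnt := 0)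
    (v := v1) hfuel hm01 hrowok0
  -- run B
  obtain ⟨⟨cB, vB⟩, hB⟩ := goB_total HgOk (fuel := visited.length) (stk := [start]) (cnt := 0)
    (v := v1) hfuel hm01
    (by intro nd hnd; simp at hnd; subst hnd; exact ⟨row0, hrow0, hrowok0⟩)
  -- Reach-sourcing of start's row
  have hsrc0 : ∀ j ∈ row0, ReachI graph v1 row0 j := fun j hj k hk => Reach.base j k hj hk
  -- invariants of the two runs
  obtain ⟨hmA, hcA, hpA⟩ := goA_post hA
  have hflA := goA_reach HgOk hm01 (mono_refl v1) hrowok0 hsrc0 hA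
  obtain ⟨hmB, hcB⟩ := goB_post hB
  obtain ⟨hrowsB, hflB⟩ := goB_reach HgOk hm01 (mono_refl v1)
    (by intro nd hnd; simp at hnd; subst hnd
        exact ⟨row0, hrow0, hrowok0, hsrc0⟩) hB
  have hpB : ∀ j ∈ row0, PySem.List.pyGet? vB j = some true :=
    fun j hj => hrowsB start (by simp) row0 hrow0 j hj
  -- completeness: every Reachable cell is True in both final states
  have hcompA : ∀ k, Reach graph v1 row0 k → vA[k]? = some true :=
    reach_true hmA.1 hpA (fun k hk => (hflA k hk).2)
  have hcompB : ∀ k, Reach graph v1 row0 k → vB[k]? = some true :=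
    reach_true hmB.1 hpB (fun k hk => (hflB k hk).2)
  have hlA : vA.length = v1.length := hmA.1
  have hlB : vB.length = v1.length := hmB.1
  -- the two final visited arrays coincide
  have hext : vA = vB := by
    apply List.ext_getElem?
    intro k
    cases hvk : v1[k]? with
    | none =>
      have hk1 : v1.length ≤ k := by
        by_contra hlt
        simp [List.getElem?_eq_none_iff] at hvk
        omega
      rw [List.getElem?_eq_none_iff.mpr (by omega : vA.length ≤ k),
        List.getElem?_eq_none_iff.mpr (by omega : vB.length ≤ k)]
    | some b =>
      have hklt : k < v1.length := (List.getElem?_eq_some_iff.mp hvk).1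
      cases b with
      | true => rw [hmA.2 k hvk, hmB.2 k hvk]
      | false =>
        cases hak : vA[k]? with
        | none => simp [List.getElem?_eq_none_iff] at hak; omega
        | some bA =>
          cases hbk : vB[k]? with
          | none => simp [List.getElem?_eq_none_iff] at hbk; omega
          | some bB =>
            cases bA with
            | true =>
              have hreach := (hflA k ⟨hvk, hak⟩).1
              rw [hcompB k hreach] at hbk
              simp [hbk]
            | false =>
              cases bB with
              | false => rfl
              | true =>
                have hreach := (hflB k ⟨hvk, hbk⟩).1
                rw [hcompA k hreach] at hak
                simp at hak
  -- equal flip counts, hence equal return values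
  have hcnt : cntF vA = cntF vB := by rw [hext]
  have hres : cA = cB := by omega
  unfold Spec_dfs dfs dfs_alt
  rw [hset, hrow0]
  simp [hA, hB, hres]
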